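-- pv_equiv track=rewrite | github.com/stevehan00/Algorithm | contests/Dev_Day(2020)/b.py | solution
-- ===== SOURCE A (Python) =====
-- from collections import defaultdict, deque
--
-- def solution(n, t1, t2):
--     answer = []
--
--     graph = defaultdict(list)
--     group = []
--
--     for i in range(len(t1)):
--         graph[t1[i]].append(t2[i])
--         graph[t2[i]].append(t1[i])
--
--     visit = set()
--
--     def bfs(start):
--         lst = [start]
--         q = deque()
--         q.append(start)
--
--         while q:
--             cur = q.popleft()
--
--             for c in graph[cur]:
--                 if c not in visit:
--                     q.append(c)
--                     visit.add(c)
--                     lst.append(c)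
--         return lst
--
--     for i in range(1,n+1):
--         if i not in graph:
--             answer.append(i)
--             continue
--
--         if i not in visit:
--             visit.add(i)
--             temp = sorted(bfs(i))
--             answer.append(temp[(len(temp)-1)//2])
--
--     return sorted(answer)
-- ===== SOURCE B (Python) =====
-- def solution(n, t1, t2):
--     # Component merging (eager-relabel union-find) instead of BFS:
--     # one pass over the edges keeps, for every node seen so far, its component
--     # representative and, per representative, the member list; merging relabels
--     # the smaller... (relabels the second) component.  Then one pass over 1..n
--     # picks each component's lower median (and isolated nodes themselves).
--     comp = {}      # node -> representative
--     members = {}   # representative -> list of member nodes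
--     for u, v in zip(t1, t2):
--         if u not in comp:
--             comp[u] = u
--             members[u] = [u]
--         if v not in comp:
--             comp[v] = v
--             members[v] = [v]
--         ru, rv = comp[u], comp[v]
--         if ru != rv:
--             mv = members[rv]
--             for x in mv:
--                 comp[x] = ru
--             members[ru] = members[ru] + mv
--             del members[rv]
--     answer = []
--     seen = set()
--     for i in range(1, n + 1):
--         if i not in comp:
--             answer.append(i)
--         else:
--             r = comp[i]
--             if r not in seen:
--                 seen.add(r)
--                 ms = sorted(members[r])
--                 answer.append(ms[(len(ms) - 1) // 2])
--     return sorted(answer)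
-- ===== Notes on version B (the rewrite author's own statement) =====
-- stated objective: alternative
-- what changed: Replaces the adjacency-dict + BFS-with-queue component search by a single edge pass that maintains a node-to-representative map with per-representative member lists, merging (eager relabel union-find) on each cross-component edge; the medians are then read off the member lists.
import Mathlib
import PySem

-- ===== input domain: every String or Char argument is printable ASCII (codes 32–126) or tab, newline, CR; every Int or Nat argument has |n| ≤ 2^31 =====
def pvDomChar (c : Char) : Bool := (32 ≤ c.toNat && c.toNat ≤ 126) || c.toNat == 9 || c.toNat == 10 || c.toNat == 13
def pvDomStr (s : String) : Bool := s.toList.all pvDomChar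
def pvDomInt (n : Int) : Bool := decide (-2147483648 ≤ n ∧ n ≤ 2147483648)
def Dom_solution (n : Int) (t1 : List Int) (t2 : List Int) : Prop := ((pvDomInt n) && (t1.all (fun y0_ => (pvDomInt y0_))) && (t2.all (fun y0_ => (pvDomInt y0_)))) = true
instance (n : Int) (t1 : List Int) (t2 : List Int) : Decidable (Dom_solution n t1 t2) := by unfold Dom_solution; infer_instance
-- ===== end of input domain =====

-- B replaces A's adjacency-dict + BFS component search by a one-pass eager-relabel
-- union-find over the edge list (alternative algorithm, same return value).

-- ===== PORT A =====

-- graph = defaultdict(list); for i in range(len(t1)): graph[t1[i]].append(t2[i]); graph[t2[i]].append(t1[i])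
def buildGraph (t1 t2 : List Int) : PySem.Dict Int (List Int) :=
  (PySem.List.pyRange 0 (t1.length : Int)).foldl
    (fun g i =>
      (g.modify (PySem.List.pyGetD t1 i 0) [] (· ++ [PySem.List.pyGetD t2 i 0])).modify
        (PySem.List.pyGetD t2 i 0) [] (· ++ [PySem.List.pyGetD t1 i 0]))
    PySem.Dict.empty

-- the 'for c in graph[cur]' body of bfs (mutates q, visit, lst)
def nbLoop : List Int → List Int → PySem.Set Int → List Int → List Int × PySem.Set Int × List Int
  | [], q, v, l => (q, v, l)
  | c :: ns, q, v, l =>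
    if PySem.Set.contains v c then nbLoop ns q v l
    else nbLoop ns (q ++ [c]) (PySem.Set.add v c) (l ++ [c])

-- any value list of the graph dict is a chunk of g.values.flatten (used for termination)
theorem getD_subset_values_flatten (g : PySem.Dict Int (List Int)) (cur : Int) :
    ∀ x ∈ g.getD cur [], x ∈ g.values.flatten := by
  intro x hx
  cases h : g.get? cur with
  | none => simp [PySem.Dict.getD, h] at hx
  | some val =>
    rw [PySem.Dict.getD, h] at hx
    simp only [Option.getD_some] at hx
    simp only [PySem.Dict.get?, Option.map_eq_some_iff] at h
    obtain ⟨p, hp, rfl⟩ := h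
    have := List.mem_of_find?_eq_some hp
    refine List.mem_flatten.2 ⟨p.2, ?_, hx⟩
    simp only [PySem.Dict.values]
    exact List.mem_map.2 ⟨p, this, rfl⟩

theorem nbLoop_grow : ∀ (ns q : List Int) (v l : List Int),
    (∀ x ∈ v, x ∈ (nbLoop ns q v l).2.1) ∧
    (∀ x ∈ (nbLoop ns q v l).2.1, x ∈ v ∨ x ∈ ns) ∧
    ((nbLoop ns q v l).2.1 = v ∧ (nbLoop ns q v l).1 = q ∨
      ∃ c ∈ ns, c ∉ v ∧ c ∈ (nbLoop ns q v l).2.1) := by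
  intro ns
  induction ns with
  | nil => intro q v l; exact ⟨fun x h => h, fun x h => Or.inl h, Or.inl ⟨rfl, rfl⟩⟩
  | cons c ns ih =>
    intro q v l
    by_cases hc : PySem.Set.contains v c = true
    · have hcv : c ∈ v := by simpa [PySem.Set.contains, List.contains_iff_mem] using hc
      simp only [nbLoop, hc, if_pos]
      obtain ⟨h1, h2, h3⟩ := ih q v l
      refine ⟨h1, fun x hx => (h2 x hx).imp id (List.mem_cons_of_mem c), ?_⟩
      exact h3.imp id (fun ⟨d, hd, h⟩ => ⟨d, List.mem_cons_of_mem c hd, h⟩)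
    · have hcv : c ∉ v := by simpa [PySem.Set.contains, List.contains_iff_mem] using hc
      simp only [nbLoop, hc, if_neg, Bool.false_eq_true, not_false_iff]
      obtain ⟨h1, h2, h3⟩ := ih (q ++ [c]) (PySem.Set.add v c) (l ++ [c])
      have hmem : ∀ x ∈ v, x ∈ PySem.Set.add v c := fun x h => (PySem.Set.mem_add v c x).2 (Or.inl h)
      refine ⟨fun x h => h1 x (hmem x h), ?_, ?_⟩
      · intro x hx
        rcases h2 x hx with h | h
        · rcases (PySem.Set.mem_add v c x).1 h with h' | rfl
          · exact Or.inl h'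
          · exact Or.inr (List.mem_cons_self)
        · exact Or.inr (List.mem_cons_of_mem c h)
      · exact Or.inr ⟨c, List.mem_cons_self, hcv, h1 c ((PySem.Set.mem_add v c c).2 (Or.inr rfl))⟩

theorem filter_not_contains_lt {v v' F : List Int} (h : ∀ x ∈ v, x ∈ v')
    (c : Int) (hcF : c ∈ F) (hcv : c ∉ v) (hcv' : c ∈ v') :
    (F.filter (fun x => !List.contains v' x)).length < (F.filter (fun x => !List.contains v x)).length := by
  have hsub : List.Sublist (F.filter (fun x => !List.contains v' x)) (F.filter (fun x => !List.contains v x)) := by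
    refine List.monotone_filter_right F ?_
    intro x hx
    simp only [Bool.not_eq_eq_eq_not, Bool.not_true, List.contains_eq_mem, decide_eq_false_iff_not] at hx ⊢
    exact fun hv => hx (h x hv)
  rcases Nat.lt_or_ge (F.filter (fun x => !List.contains v' x)).length (F.filter (fun x => !List.contains v x)).length with h' | h'
  · exact h'
  · exfalso
    have heq := hsub.eq_of_length (Nat.le_antisymm hsub.length_le h')
    have hc1 : c ∈ F.filter (fun x => !List.contains v x) := by
      simp [List.mem_filter, hcF, hcv]
    rw [← heq] at hc1
    have := (List.mem_filter.1 hc1).2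
    simp [hcv'] at this

-- while q: cur = q.popleft(); for c in graph[cur]: …
def bfsLoop (g : PySem.Dict Int (List Int)) : List Int → PySem.Set Int → List Int → PySem.Set Int × List Int
  | [], v, l => (v, l)
  | cur :: qs, v, l =>
    let r := nbLoop (g.getD cur []) qs v l
    bfsLoop g r.1 r.2.1 r.2.2
termination_by q v _ => ((g.values.flatten.filter (fun x => !List.contains v x)).length, q.length)
decreasing_by
  obtain ⟨h1, h2, h3⟩ := nbLoop_grow (g.getD cur []) qs v l
  rcases h3 with ⟨hv, hq⟩ | ⟨c, hc, hcv, hcv'⟩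
  · rw [hv, hq]
    exact Prod.Lex.right _ (Nat.lt_succ_self _)
  · exact Prod.Lex.left _ _ (filter_not_contains_lt h1 c (getD_subset_values_flatten g cur c hc) hcv hcv')

-- body of 'for i in range(1, n+1)' (answer, visit are the mutated state)
def aOuterStep (graph : PySem.Dict Int (List Int)) (st : List Int × PySem.Set Int) (i : Int) :
    List Int × PySem.Set Int :=
  if !graph.contains i then (st.1 ++ [i], st.2)
  else if PySem.Set.contains st.2 i then st
  else
    let v1 := PySem.Set.add st.2 i
    let r := bfsLoop graph [i] v1 [i]
    let temp := PySem.List.sorted r.2 (fun x => x)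
    (st.1 ++ [PySem.List.pyGetD temp (PySem.Int.floordiv ((temp.length : Int) - 1) 2) 0], r.1)

def solution (n : Int) (t1 : List Int) (t2 : List Int) : List Int :=
  let graph := buildGraph t1 t2
  let st := (PySem.List.pyRange 1 (n + 1)).foldl (aOuterStep graph) ([], PySem.Set.empty)
  PySem.List.sorted st.1 (fun x => x)

-- ===== PORT B =====

-- one edge of the merging pass: ensure u, v are tracked, then merge their components
def altEdgeStep (st : PySem.Dict Int Int × PySem.Dict Int (List Int)) (e : Int × Int) :
    PySem.Dict Int Int × PySem.Dict Int (List Int) :=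
  let s1 := if st.1.contains e.1 then st else (st.1.insert e.1 e.1, st.2.insert e.1 [e.1])
  let s2 := if s1.1.contains e.2 then s1 else (s1.1.insert e.2 e.2, s1.2.insert e.2 [e.2])
  let ru := s2.1.getD e.1 0        -- key is always present here (both endpoints were just ensured)
  let rv := s2.1.getD e.2 0
  if ru = rv then s2
  else
    let mv := s2.2.getD rv []      -- key rv is always present here
    ((mv.foldl (fun c x => c.insert x ru) s2.1), (s2.2.modify ru [] (· ++ mv)).erase rv)

-- body of B's 'for i in range(1, n+1)' (answer, seen are the mutated state)
def bOuterStep (comp : PySem.Dict Int Int) (members : PySem.Dict Int (List Int))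
    (acc : List Int × PySem.Set Int) (i : Int) : List Int × PySem.Set Int :=
  if !comp.contains i then (acc.1 ++ [i], acc.2)
  else
    let r := comp.getD i 0         -- key i is present (contains just checked)
    if PySem.Set.contains acc.2 r then acc
    else
      let ms := PySem.List.sorted (members.getD r []) (fun x => x)
      (acc.1 ++ [PySem.List.pyGetD ms (PySem.Int.floordiv ((ms.length : Int) - 1) 2) 0],
        PySem.Set.add acc.2 r)

def solution_alt (n : Int) (t1 : List Int) (t2 : List Int) : List Int :=
  let st := (t1.zip t2).foldl altEdgeStep (PySem.Dict.empty, PySem.Dict.empty)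
  let res := (PySem.List.pyRange 1 (n + 1)).foldl (bOuterStep st.1 st.2) ([], PySem.Set.empty)
  PySem.List.sorted res.1 (fun x => x)


-- ===== PRECONDITION & SPEC =====
-- Pre_ excludes exactly the inputs where A raises IndexError: t2 shorter than t1 (t2[i] out of range).
def Pre_solution (n : Int) (t1 : List Int) (t2 : List Int) : Prop := t1.length ≤ t2.length
instance (n : Int) (t1 : List Int) (t2 : List Int) : Decidable (Pre_solution n t1 t2) := by unfold Pre_solution; infer_instance
def pvWitness_solution : Int × List Int × List Int := (3, [1, 2], [2, 3])

def Spec_solution (n : Int) (t1 : List Int) (t2 : List Int) (out : List Int) : Prop := out = solution_alt n t1 t2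
instance (n : Int) (t1 : List Int) (t2 : List Int) (out : List Int) : Decidable (Spec_solution n t1 t2 out) := by unfold Spec_solution; infer_instance

-- ===== CLAIM (what is proved, stated in full; the proofs are below) =====
def Claim_equal_solution : Prop := ∀ (n : Int) (t1 : List Int) (t2 : List Int), Dom_solution n t1 t2 → Pre_solution n t1 t2 → Spec_solution n t1 t2 (solution n t1 t2)
-- ===== LEMMAS AND PROOFS =====
-- ===== connectivity over an edge list =====
def adjE (E : List (Int × Int)) (x y : Int) : Prop := (x, y) ∈ E ∨ (y, x) ∈ E
def ConnE (E : List (Int × Int)) : Int → Int → Prop := Relation.ReflTransGen (adjE E)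
def endsP (E : List (Int × Int)) (x : Int) : Prop := ∃ p ∈ E, x = p.1 ∨ x = p.2

theorem connE_symm {E : List (Int × Int)} {x y : Int} (h : ConnE E x y) : ConnE E y x :=
  Relation.ReflTransGen.symmetric (fun _ _ h => h.symm) h

theorem adjE_ends {E : List (Int × Int)} {x y : Int} (h : adjE E x y) : endsP E x ∧ endsP E y := by
  rcases h with h | h
  · exact ⟨⟨(x, y), h, Or.inl rfl⟩, ⟨(x, y), h, Or.inr rfl⟩⟩
  · exact ⟨⟨(y, x), h, Or.inr rfl⟩, ⟨(y, x), h, Or.inl rfl⟩⟩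

theorem connE_ends {E : List (Int × Int)} {x y : Int} (h : ConnE E x y) : x = y ∨ (endsP E x ∧ endsP E y) := by
  induction h with
  | refl => exact Or.inl rfl
  | tail _ hadj ih =>
    rename_i b c _
    rcases ih with rfl | ⟨hx, _⟩
    · exact Or.inr (adjE_ends hadj)
    · exact Or.inr ⟨hx, (adjE_ends hadj).2⟩

theorem endsP_append {E F : List (Int × Int)} {x : Int} :
    endsP (E ++ F) x ↔ endsP E x ∨ endsP F x := by
  constructor
  · rintro ⟨p, hp, h⟩
    rcases List.mem_append.1 hp with hp | hp
    · exact Or.inl ⟨p, hp, h⟩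
    · exact Or.inr ⟨p, hp, h⟩
  · rintro (⟨p, hp, h⟩ | ⟨p, hp, h⟩)
    · exact ⟨p, List.mem_append.2 (Or.inl hp), h⟩
    · exact ⟨p, List.mem_append.2 (Or.inr hp), h⟩

theorem endsP_single {u v x : Int} : endsP [(u, v)] x ↔ x = u ∨ x = v := by
  constructor
  · rintro ⟨p, hp, h⟩; simp at hp; subst hp; simpa using h
  · rintro (rfl | rfl)
    · exact ⟨(x, v), by simp⟩
    · exact ⟨(u, x), by simp⟩

theorem connE_mono {E F : List (Int × Int)} {x y : Int} (hsub : ∀ p ∈ E, p ∈ F) (h : ConnE E x y) : ConnE F x y := by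
  induction h with
  | refl => exact Relation.ReflTransGen.refl
  | tail _ hadj ih => exact ih.tail (hadj.imp (hsub _) (hsub _))

theorem connE_append_iff {E : List (Int × Int)} {u v x y : Int} :
    ConnE (E ++ [(u, v)]) x y ↔
      ConnE E x y ∨ (ConnE E x u ∧ ConnE E v y) ∨ (ConnE E x v ∧ ConnE E u y) := by
  constructor
  · intro h
    induction h with
    | refl => exact Or.inl Relation.ReflTransGen.refl
    | tail _ hadj ih =>
      rename_i b c _
      have hadj' : adjE E b c ∨ (b = u ∧ c = v) ∨ (b = v ∧ c = u) := by
        rcases hadj with h | h <;> rcases List.mem_append.1 h with h | h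
        · exact Or.inl (Or.inl h)
        · simp at h; exact Or.inr (Or.inl ⟨h.1, h.2⟩)
        · exact Or.inl (Or.inr h)
        · simp at h; exact Or.inr (Or.inr ⟨h.2, h.1⟩)
      rcases hadj' with h | ⟨rfl, rfl⟩ | ⟨rfl, rfl⟩
      · rcases ih with ih | ⟨h1, h2⟩ | ⟨h1, h2⟩
        · exact Or.inl (ih.tail h)
        · exact Or.inr (Or.inl ⟨h1, h2.tail h⟩)
        · exact Or.inr (Or.inr ⟨h1, h2.tail h⟩)
      · rcases ih with ih | ⟨h1, h2⟩ | ⟨h1, h2⟩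
        · exact Or.inr (Or.inl ⟨ih, Relation.ReflTransGen.refl⟩)
        · exact Or.inr (Or.inl ⟨h1, Relation.ReflTransGen.refl⟩)
        · exact Or.inl h1
      · rcases ih with ih | ⟨h1, h2⟩ | ⟨h1, h2⟩
        · exact Or.inr (Or.inr ⟨ih, Relation.ReflTransGen.refl⟩)
        · exact Or.inl h1
        · exact Or.inr (Or.inr ⟨h1, Relation.ReflTransGen.refl⟩)
  · have hmono : ∀ a b : Int, ConnE E a b → ConnE (E ++ [(u, v)]) a b :=
      fun a b => connE_mono (fun p hp => List.mem_append.2 (Or.inl hp))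
    have huv : ConnE (E ++ [(u, v)]) u v :=
      Relation.ReflTransGen.single (Or.inl (List.mem_append.2 (Or.inr (by simp))))
    rintro (h | ⟨h1, h2⟩ | ⟨h1, h2⟩)
    · exact hmono _ _ h
    · exact ((hmono _ _ h1).trans huv).trans (hmono _ _ h2)
    · exact ((hmono _ _ h1).trans (connE_symm huv)).trans (hmono _ _ h2)

-- ===== Dict helper lemmas =====
theorem get?_erase {κ ν : Type} [BEq κ] [LawfulBEq κ] [DecidableEq κ] (d : PySem.Dict κ ν) (k k' : κ) :
    (d.erase k).get? k' = if k' = k then none else d.get? k' := by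
  obtain ⟨items⟩ := d
  simp only [PySem.Dict.erase, PySem.Dict.get?]
  induction items with
  | nil => simp
  | cons p ps ih =>
    by_cases h1 : p.1 = k <;> by_cases h2 : p.1 = k' <;>
      simp_all [List.filter_cons, List.find?_cons] <;> split <;> simp_all

theorem getD_erase {κ ν : Type} [BEq κ] [LawfulBEq κ] [DecidableEq κ] (d : PySem.Dict κ ν) (k k' : κ) (d0 : ν) :
    (d.erase k).getD k' d0 = if k' = k then d0 else d.getD k' d0 := by
  simp only [PySem.Dict.getD, get?_erase]; split <;> rfl

theorem contains_erase {κ ν : Type} [BEq κ] [LawfulBEq κ] [DecidableEq κ] (d : PySem.Dict κ ν) (k k' : κ) :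
    (d.erase k).contains k' = if k' = k then false else d.contains k' := by
  rw [PySem.Dict.contains_eq_isSome_get?, PySem.Dict.contains_eq_isSome_get?, get?_erase]
  split <;> simp

theorem getD_foldl_insert_const (l : List Int) (c : PySem.Dict Int Int) (r y : Int) :
    (l.foldl (fun c x => c.insert x r) c).getD y 0 = if y ∈ l then r else c.getD y 0 := by
  induction l generalizing c with
  | nil => simp
  | cons x xs ih =>
    rw [List.foldl_cons, ih]
    by_cases hy : y ∈ xs
    · simp [hy]
    · by_cases hyx : y = x <;> simp [hy, hyx, PySem.Dict.getD_insert]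

theorem contains_foldl_insert_const (l : List Int) (c : PySem.Dict Int Int) (r y : Int) :
    (l.foldl (fun c x => c.insert x r) c).contains y = (y ∈ l || c.contains y) := by
  induction l generalizing c with
  | nil => simp
  | cons x xs ih =>
    simp only [List.foldl_cons, ih, List.mem_cons, PySem.Dict.contains_insert]
    by_cases hy : y ∈ xs <;> by_cases hyx : y = x <;> simp_all

-- ===== graph characterization =====
def gStep (g : PySem.Dict Int (List Int)) (p : Int × Int) : PySem.Dict Int (List Int) :=
  (g.modify p.1 [] (· ++ [p.2])).modify p.2 [] (· ++ [p.1])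

theorem contains_gfold (E : List (Int × Int)) (d : PySem.Dict Int (List Int)) (x : Int) :
    (E.foldl gStep d).contains x = true ↔ d.contains x = true ∨ endsP E x := by
  induction E generalizing d with
  | nil => simp [endsP]
  | cons e E ih =>
    rw [List.foldl_cons, ih]
    have : endsP (e :: E) x ↔ (x = e.1 ∨ x = e.2) ∨ endsP E x := by
      rw [show e :: E = [e] ++ E from rfl, endsP_append]
      constructor
      · rintro (⟨p, hp, h⟩ | h)
        · simp at hp; subst hp; exact Or.inl h
        · exact Or.inr h
      · rintro ((h | h) | h)
        · exact Or.inl ⟨e, by simp, Or.inl h⟩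
        · exact Or.inl ⟨e, by simp, Or.inr h⟩
        · exact Or.inr h
    rw [this]
    simp only [gStep, PySem.Dict.contains_modify]
    constructor
    · rintro (h | h)
      · rcases Bool.or_eq_true_iff.1 h with h | h
        · exact Or.inr (Or.inl (Or.inr (by simpa using h)))
        · rcases Bool.or_eq_true_iff.1 h with h | h
          · exact Or.inr (Or.inl (Or.inl (by simpa using h)))
          · exact Or.inl h
      · exact Or.inr (Or.inr h)
    · rintro (h | (h | h) | h)
      · exact Or.inl (by simp [h])
      · exact Or.inl (by simp [h])
      · exact Or.inl (by simp [h])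
      · exact Or.inr h

theorem getD_gStep (d : PySem.Dict Int (List Int)) (e : Int × Int) (x c : Int) :
    c ∈ (gStep d e).getD x [] ↔ c ∈ d.getD x [] ∨ (x = e.1 ∧ c = e.2) ∨ (x = e.2 ∧ c = e.1) := by
  simp only [gStep, PySem.Dict.getD_modify]
  by_cases h2 : x = e.2
  · subst h2
    by_cases h1 : e.2 = e.1
    · rw [if_pos rfl, if_pos h1]
      simp only [List.mem_append, List.mem_singleton]
      constructor
      · rintro ((h | h) | h)
        · exact Or.inl (h1 ▸ h)
        · exact Or.inr (Or.inl ⟨h1, h⟩)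
        · exact Or.inr (Or.inr ⟨by trivial, h⟩)
      · rintro (h | ⟨_, h⟩ | ⟨_, h⟩)
        · exact Or.inl (Or.inl (h1 ▸ h))
        · exact Or.inl (Or.inr h)
        · exact Or.inr h
    · rw [if_pos rfl, if_neg h1]
      simp only [List.mem_append, List.mem_singleton]
      constructor
      · rintro (h | h)
        · exact Or.inl h
        · exact Or.inr (Or.inr ⟨by trivial, h⟩)
      · rintro (h | ⟨h, _⟩ | ⟨_, h⟩)
        · exact Or.inl h
        · exact absurd h h1
        · exact Or.inr h
  · rw [if_neg h2]
    by_cases h1 : x = e.1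
    · rw [if_pos h1]
      subst h1
      simp only [List.mem_append, List.mem_singleton]
      constructor
      · rintro (h | h)
        · exact Or.inl h
        · exact Or.inr (Or.inl ⟨by trivial, h⟩)
      · rintro (h | ⟨_, h⟩ | ⟨h, _⟩)
        · exact Or.inl h
        · exact Or.inr h
        · exact absurd h h2
    · rw [if_neg h1]
      constructor
      · exact fun h => Or.inl h
      · rintro (h | ⟨h, _⟩ | ⟨h, _⟩)
        · exact h
        · exact absurd h h1
        · exact absurd h h2

theorem getD_gfold (E : List (Int × Int)) (d : PySem.Dict Int (List Int)) (x c : Int) :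
    c ∈ (E.foldl gStep d).getD x [] ↔ c ∈ d.getD x [] ∨ adjE E x c := by
  induction E generalizing d with
  | nil => simp [adjE]
  | cons e E ih =>
    rw [List.foldl_cons, ih, getD_gStep]
    have hadj : adjE (e :: E) x c ↔ ((x = e.1 ∧ c = e.2) ∨ (x = e.2 ∧ c = e.1)) ∨ adjE E x c := by
      simp only [adjE, List.mem_cons, Prod.ext_iff]
      tauto
    rw [hadj]
    tauto

-- ===== fold over range(len(t1)) with indexing = fold over zip =====
theorem foldl_range_getD_zip {β : Type} (t1 t2 : List Int) (h : t1.length ≤ t2.length)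
    (f : β → Int → Int → β) (init : β) :
    (PySem.List.pyRange 0 (t1.length : Int)).foldl
      (fun b i => f b (PySem.List.pyGetD t1 i 0) (PySem.List.pyGetD t2 i 0)) init
    = (t1.zip t2).foldl (fun b p => f b p.1 p.2) init := by
  have hzlen : (t1.zip t2).length = t1.length := by simp [List.length_zip]; omega
  have aux : ∀ k : Nat, k ≤ t1.length →
      (PySem.List.pyRange 0 (k : Int)).foldl
        (fun b i => f b (PySem.List.pyGetD t1 i 0) (PySem.List.pyGetD t2 i 0)) init
      = ((t1.zip t2).take k).foldl (fun b p => f b p.1 p.2) init := by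
    intro k
    induction k with
    | zero => intro _; simp [PySem.List.pyRange]
    | succ k ih =>
      intro hk
      have hk' : k ≤ t1.length := Nat.le_of_succ_le hk
      have hcast : ((k + 1 : Nat) : Int) = (k : Int) + 1 := by push_cast; ring
      rw [hcast, PySem.List.pyRange_one_succ_right (by positivity), List.foldl_append, ih hk']
      have hkz : k < (t1.zip t2).length := by omega
      have htake : (t1.zip t2).take (k + 1) = (t1.zip t2).take k ++ [(t1.zip t2)[k]] :=
        List.take_succ_eq_append_getElem hkz
      rw [htake, List.foldl_append]
      simp only [List.foldl_cons, List.foldl_nil]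
      rw [List.getElem_zip,
        PySem.List.pyGetD_eq_getElem t1 0 (by positivity) (by exact_mod_cast (by omega : k < t1.length)),
        PySem.List.pyGetD_eq_getElem t2 0 (by positivity) (by exact_mod_cast (by omega : k < t2.length))]
      simp
  have := aux t1.length (le_refl _)
  rwa [List.take_of_length_le (by omega)] at this

-- ===== the inner neighbour loop appends one block `add` to q, visit and lst alike =====
theorem nbLoop_spec : ∀ (ns q v l : List Int), ∃ add : List Int,
    nbLoop ns q v l = (q ++ add, v ++ add, l ++ add) ∧ add.Nodup ∧
    (∀ a ∈ add, a ∈ ns ∧ a ∉ v) ∧ (∀ c ∈ ns, c ∈ v ∨ c ∈ add) := by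
  intro ns
  induction ns with
  | nil =>
    intro q v l
    exact ⟨[], by simp [nbLoop], by simp, by simp, by simp⟩
  | cons c ns ih =>
    intro q v l
    by_cases hc : c ∈ v
    · have hcb : PySem.Set.contains v c = true := by
        simpa [PySem.Set.contains, List.contains_iff_mem] using hc
      obtain ⟨add, he, hnd, hmem, hcov⟩ := ih q v l
      have hstep : nbLoop (c :: ns) q v l = nbLoop ns q v l := by
        simp only [nbLoop]; rw [if_pos hcb]
      refine ⟨add, by rw [hstep, he], hnd,
        fun a ha => ⟨List.mem_cons_of_mem c (hmem a ha).1, (hmem a ha).2⟩, ?_⟩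
      intro d hd
      rcases List.mem_cons.1 hd with rfl | hd
      · exact Or.inl hc
      · exact hcov d hd
    · have hcb : PySem.Set.contains v c = false := by
        simpa [PySem.Set.contains, List.contains_iff_mem] using hc
      have hadd : PySem.Set.add v c = v ++ [c] := PySem.Set.add_of_not_mem hc
      obtain ⟨add, he, hnd, hmem, hcov⟩ := ih (q ++ [c]) (v ++ [c]) (l ++ [c])
      have hstep : nbLoop (c :: ns) q v l = nbLoop ns (q ++ [c]) (PySem.Set.add v c) (l ++ [c]) := by
        simp only [nbLoop]; rw [if_neg (by rw [hcb]; exact Bool.false_ne_true)]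
      refine ⟨c :: add, ?_, ?_, ?_, ?_⟩
      · rw [hstep, hadd, he]
        simp [List.append_assoc]
      · refine List.nodup_cons.2 ⟨fun hca => ?_, hnd⟩
        exact (hmem c hca).2 (List.mem_append.2 (Or.inr (by simp)))
      · intro a ha
        rcases List.mem_cons.1 ha with rfl | ha
        · exact ⟨List.mem_cons_self, hc⟩
        · exact ⟨List.mem_cons_of_mem c (hmem a ha).1,
            fun hv => (hmem a ha).2 (List.mem_append.2 (Or.inl hv))⟩
      · intro d hd
        rcases List.mem_cons.1 hd with rfl | hd
        · exact Or.inr List.mem_cons_self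
        · rcases hcov d hd with hv | hd'
          · rcases List.mem_append.1 hv with hv | hv
            · exact Or.inl hv
            · simp at hv; subst hv; exact Or.inr List.mem_cons_self
          · exact Or.inr (List.mem_cons_of_mem c hd')

-- ===== BFS computes exactly the connected component of the start node =====
theorem bfs_spec (g : PySem.Dict Int (List Int)) (E : List (Int × Int)) (P : Int → Prop) (i : Int)
    (Hg : ∀ x c, c ∈ g.getD x [] ↔ adjE E x c)
    (Hdis : ∀ x, ConnE E i x → ¬ P x) :
    ∀ (q : List Int) (v : PySem.Set Int) (l : List Int),
    (∀ x ∈ q, x ∈ l) →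
    (∀ x, x ∈ v ↔ P x ∨ x ∈ l) →
    l.Nodup →
    (∀ x ∈ l, ConnE E i x) →
    (∀ x ∈ l, x ∉ q → ∀ c, adjE E x c → (P c ∨ c ∈ l)) →
    i ∈ l →
    (bfsLoop g q v l).2.Nodup ∧ (∀ x, x ∈ (bfsLoop g q v l).2 ↔ ConnE E i x) ∧
      (∀ x, x ∈ (bfsLoop g q v l).1 ↔ P x ∨ ConnE E i x) := by
  intro q v l
  induction q, v, l using bfsLoop.induct g with
  | case1 v l =>
    intro _ hvl hl hconn hdone hi
    have hclose : ∀ x, ConnE E i x → x ∈ l := by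
      intro x hx
      induction hx with
      | refl => exact hi
      | @tail b c hxb hadj ih2 =>
        rcases hdone b ih2 (by simp) c hadj with h | h
        · exact absurd h (Hdis c (hxb.tail hadj))
        · exact h
    refine ⟨by simpa [bfsLoop] using hl, ?_, ?_⟩
    · intro x
      simp only [bfsLoop]
      exact ⟨hconn x, hclose x⟩
    · intro x
      simp only [bfsLoop]
      rw [hvl x]
      exact or_congr_right ⟨hconn x, hclose x⟩
  | case2 cur qs v l r ih =>
    intro hql hvl hl hconn hdone hi
    obtain ⟨add, he, hnd, hmem, hcov⟩ := nbLoop_spec (g.getD cur []) qs v l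
    have hr : r = (qs ++ add, v ++ add, l ++ add) := he
    rw [show bfsLoop g (cur :: qs) v l = bfsLoop g r.1 r.2.1 r.2.2 from by rw [bfsLoop]]
    rw [hr] at ih ⊢
    have hcur_l : cur ∈ l := hql cur List.mem_cons_self
    have hconn_cur : ConnE E i cur := hconn cur hcur_l
    have hadd_adj : ∀ a ∈ add, adjE E cur a := fun a ha => (Hg cur a).1 (hmem a ha).1
    have hadd_conn : ∀ a ∈ add, ConnE E i a := fun a ha => hconn_cur.tail (hadd_adj a ha)
    have hadd_nl : ∀ a ∈ add, a ∉ l := by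
      intro a ha hal
      exact (hmem a ha).2 ((hvl a).2 (Or.inr hal))
    apply ih
    · intro x hx
      rcases List.mem_append.1 hx with hx | hx
      · exact List.mem_append.2 (Or.inl (hql x (List.mem_cons_of_mem cur hx)))
      · exact List.mem_append.2 (Or.inr hx)
    · intro x
      constructor
      · intro hx
        rcases List.mem_append.1 hx with hx | hx
        · exact ((hvl x).1 hx).imp id (fun h => List.mem_append.2 (Or.inl h))
        · exact Or.inr (List.mem_append.2 (Or.inr hx))
      · rintro (hx | hx)
        · exact List.mem_append.2 (Or.inl ((hvl x).2 (Or.inl hx)))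
        · rcases List.mem_append.1 hx with hx | hx
          · exact List.mem_append.2 (Or.inl ((hvl x).2 (Or.inr hx)))
          · exact List.mem_append.2 (Or.inr hx)
    · exact hl.append hnd (List.disjoint_left.2 (fun a hal ha => hadd_nl a ha hal))
    · intro x hx
      rcases List.mem_append.1 hx with hx | hx
      · exact hconn x hx
      · exact hadd_conn x hx
    · intro x hx hxq c hadj
      by_cases hxc : x = cur
      · subst hxc
        rcases hcov c ((Hg x c).2 hadj) with hcv | hca
        · exact ((hvl c).1 hcv).imp id (fun h => List.mem_append.2 (Or.inl h))
        · exact Or.inr (List.mem_append.2 (Or.inr hca))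
      · have hxl : x ∈ l := by
          rcases List.mem_append.1 hx with hx | hx
          · exact hx
          · exact absurd (List.mem_append.2 (Or.inr hx)) hxq
        have hxq' : x ∉ cur :: qs := by
          intro hmem'
          rcases List.mem_cons.1 hmem' with rfl | h
          · exact hxc rfl
          · exact hxq (List.mem_append.2 (Or.inl h))
        exact (hdone x hxl hxq' c hadj).imp id (fun h => List.mem_append.2 (Or.inl h))
    · exact List.mem_append.2 (Or.inl hi)

-- ===== invariant of B's merging pass =====
def BInvD (E : List (Int × Int)) (D : Int → Prop) (c : PySem.Dict Int Int)
    (m : PySem.Dict Int (List Int)) : Prop :=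
  (∀ x, endsP E x → D x) ∧
  (∀ x, c.contains x = true ↔ D x) ∧
  (∀ x, D x → D (c.getD x 0) ∧ c.getD (c.getD x 0) 0 = c.getD x 0) ∧
  (∀ x y, D x → D y → (c.getD x 0 = c.getD y 0 ↔ ConnE E x y)) ∧
  (∀ r, m.contains r = true ↔ (D r ∧ c.getD r 0 = r)) ∧
  (∀ r, D r → c.getD r 0 = r → (m.getD r []).Nodup ∧ ∀ x, x ∈ m.getD r [] ↔ (D x ∧ c.getD x 0 = r))

theorem BInvD_congr {E : List (Int × Int)} {D D' : Int → Prop} {c : PySem.Dict Int Int}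
    {m : PySem.Dict Int (List Int)} (hDD : ∀ x, D x ↔ D' x) (h : BInvD E D c m) :
    BInvD E D' c m := by
  obtain ⟨h1, h2, h3, h4, h5, h6⟩ := h
  refine ⟨fun x hx => (hDD x).1 (h1 x hx), fun x => (h2 x).trans (hDD x), ?_, ?_, ?_, ?_⟩
  · intro x hx
    obtain ⟨ha, hb⟩ := h3 x ((hDD x).2 hx)
    exact ⟨(hDD _).1 ha, hb⟩
  · intro x y hx hy
    exact h4 x y ((hDD x).2 hx) ((hDD y).2 hy)
  · intro r
    rw [h5 r, hDD r]
  · intro r hr hroot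
    obtain ⟨ha, hb⟩ := h6 r ((hDD r).2 hr) hroot
    exact ⟨ha, fun x => (hb x).trans (by rw [hDD x])⟩

theorem connE_refl {E : List (Int × Int)} (x : Int) : ConnE E x x := Relation.ReflTransGen.refl

theorem connE_append_of_conn {E : List (Int × Int)} {u v : Int} (huv : ConnE E u v) (x y : Int) :
    ConnE (E ++ [(u, v)]) x y ↔ ConnE E x y := by
  rw [connE_append_iff]
  constructor
  · rintro (h | ⟨h1, h2⟩ | ⟨h1, h2⟩)
    · exact h
    · exact (h1.trans huv).trans h2
    · exact (h1.trans (connE_symm huv)).trans h2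
  · exact Or.inl

-- ensuring a key: fresh node becomes a singleton component
theorem BInv_ensure_old {E : List (Int × Int)} {D : Int → Prop} {c : PySem.Dict Int Int}
    {m : PySem.Dict Int (List Int)} (h : BInvD E D c m) (u : Int) (hu : D u) :
    BInvD E (fun x => D x ∨ x = u) c m :=
  BInvD_congr (fun x => ⟨Or.inl, fun hx => hx.elim id (fun he => he ▸ hu)⟩) h

theorem BInv_ensure_new {E : List (Int × Int)} {D : Int → Prop} {c : PySem.Dict Int Int}
    {m : PySem.Dict Int (List Int)} (h : BInvD E D c m) (u : Int) (hu : ¬ D u) :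
    BInvD E (fun x => D x ∨ x = u) (c.insert u u) (m.insert u [u]) := by
  obtain ⟨h1, h2, h3, h4, h5, h6⟩ := h
  have hρ : ∀ x, (c.insert u u).getD x 0 = if x = u then u else c.getD x 0 :=
    fun x => PySem.Dict.getD_insert c u x u 0
  have hDne : ∀ x, D x → x ≠ u := fun x hx he => hu (he ▸ hx)
  have hρD : ∀ x, D x → (c.insert u u).getD x 0 = c.getD x 0 := by
    intro x hx; rw [hρ, if_neg (hDne x hx)]
  refine ⟨fun x hx => Or.inl (h1 x hx), ?_, ?_, ?_, ?_, ?_⟩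
  · intro x
    rw [PySem.Dict.contains_insert, Bool.or_eq_true_iff]
    constructor
    · rintro (hb | hb)
      · exact Or.inr (by simpa using hb)
      · exact Or.inl ((h2 x).1 hb)
    · rintro (hd | rfl)
      · exact Or.inr ((h2 x).2 hd)
      · exact Or.inl (by simp)
  · rintro x (hx | rfl)
    · rw [hρD x hx]
      obtain ⟨ha, hb⟩ := h3 x hx
      exact ⟨Or.inl ha, by rw [hρD _ ha, hb]⟩
    · rw [hρ, if_pos rfl]
      exact ⟨Or.inr rfl, by rw [hρ, if_pos rfl]⟩
  · rintro x y (hx | rfl) (hy | rfl)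
    · rw [hρD x hx, hρD y hy]; exact h4 x y hx hy
    · rw [hρD x hx, hρ, if_pos rfl]
      constructor
      · intro he
        exact absurd ((h3 x hx).1) (he ▸ hu)
      · intro hc
        rcases connE_ends (connE_symm hc) with rfl | ⟨hex, _⟩
        · exact absurd hx hu
        · exact absurd (h1 _ hex) hu
    · rw [hρD y hy, hρ, if_pos rfl]
      constructor
      · intro he
        exact absurd ((h3 y hy).1) (he ▸ hu)
      · intro hc
        rcases connE_ends hc with rfl | ⟨hex, _⟩
        · exact absurd hy hu
        · exact absurd (h1 _ hex) hu
    · exact ⟨fun _ => connE_refl _, fun _ => rfl⟩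
  · intro r
    rw [PySem.Dict.contains_insert, Bool.or_eq_true_iff]
    constructor
    · rintro (hb | hb)
      · have : r = u := by simpa using hb
        subst this
        exact ⟨Or.inr rfl, by rw [hρ, if_pos rfl]⟩
      · obtain ⟨hd, hroot⟩ := (h5 r).1 hb
        exact ⟨Or.inl hd, by rw [hρD r hd]; exact hroot⟩
    · rintro ⟨hd | rfl, hroot⟩
      · exact Or.inr ((h5 r).2 ⟨hd, by rwa [hρD r hd] at hroot⟩)
      · exact Or.inl (by simp)
  · rintro r (hr | rfl) hroot
    · rw [hρD r hr] at hroot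
      have hrne : r ≠ u := hDne r hr
      rw [show (m.insert u [u]).getD r [] = m.getD r [] from by
        rw [PySem.Dict.getD_insert]; exact if_neg hrne]
      obtain ⟨ha, hb⟩ := h6 r hr hroot
      refine ⟨ha, ?_⟩
      intro x
      rw [hb x]
      constructor
      · rintro ⟨hd, he⟩
        exact ⟨Or.inl hd, by rw [hρD x hd]; exact he⟩
      · rintro ⟨hd | rfl, he⟩
        · rw [hρD x hd] at he; exact ⟨hd, he⟩
        · rw [hρ, if_pos rfl] at he
          exact absurd he.symm hrne
    · rw [show (m.insert r [r]).getD r [] = [r] from PySem.Dict.getD_insert_self m r [r] []]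
      refine ⟨List.nodup_singleton r, ?_⟩
      intro x
      simp only [List.mem_singleton]
      constructor
      · rintro rfl
        exact ⟨Or.inr rfl, by rw [hρ, if_pos rfl]⟩
      · rintro ⟨hd | rfl, he⟩
        · rw [hρD x hd] at he
          exact absurd (he ▸ (h3 x hd).1) hu
        · rfl

-- adding an edge inside one component changes nothing
theorem BInv_edge_same {E : List (Int × Int)} {D : Int → Prop} {c : PySem.Dict Int Int}
    {m : PySem.Dict Int (List Int)} (h : BInvD E D c m) {u v : Int} (hu : D u) (hv : D v)
    (hrr : c.getD u 0 = c.getD v 0) : BInvD (E ++ [(u, v)]) D c m := by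
  obtain ⟨h1, h2, h3, h4, h5, h6⟩ := h
  have huv : ConnE E u v := (h4 u v hu hv).1 hrr
  refine ⟨?_, h2, h3, ?_, h5, h6⟩
  · intro x hx
    rcases endsP_append.1 hx with hx | hx
    · exact h1 x hx
    · rcases endsP_single.1 hx with rfl | rfl
      · exact hu
      · exact hv
  · intro x y hx hy
    rw [h4 x y hx hy, connE_append_of_conn huv]

-- adding an edge between two components merges them (eager relabel)
theorem BInv_edge_merge {E : List (Int × Int)} {D : Int → Prop} {c : PySem.Dict Int Int}
    {m : PySem.Dict Int (List Int)} (h : BInvD E D c m) {u v : Int} (hu : D u) (hv : D v)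
    {ru rv : Int} (hru : ru = c.getD u 0) (hrv : rv = c.getD v 0) (hrr : ru ≠ rv) :
    BInvD (E ++ [(u, v)]) D
      ((m.getD rv []).foldl (fun c x => c.insert x ru) c)
      ((m.modify ru [] (· ++ (m.getD rv []))).erase rv) := by
  obtain ⟨h1, h2, h3, h4, h5, h6⟩ := h
  set mlist := m.getD rv [] with hml
  have hDru : D ru := hru ▸ (h3 u hu).1
  have hruroot : c.getD ru 0 = ru := by rw [hru]; exact (h3 u hu).2
  have hDrv : D rv := hrv ▸ (h3 v hv).1
  have hrvroot : c.getD rv 0 = rv := by rw [hrv]; exact (h3 v hv).2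
  obtain ⟨hmlnd, hmlmem⟩ := h6 rv hDrv hrvroot
  -- the fold writes ru at every key of mlist and nothing else
  have hfold : ∀ y, ((mlist.foldl (fun c x => c.insert x ru) c).getD y 0) =
      if y ∈ mlist then ru else c.getD y 0 := fun y => getD_foldl_insert_const mlist c ru y
  have hρ'a : ∀ x, D x → c.getD x 0 = rv → (mlist.foldl (fun c x => c.insert x ru) c).getD x 0 = ru := by
    intro x hx he
    rw [hfold, if_pos ((hmlmem x).2 ⟨hx, he⟩)]
  have hρ'b : ∀ x, c.getD x 0 ≠ rv → (mlist.foldl (fun c x => c.insert x ru) c).getD x 0 = c.getD x 0 := by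
    intro x he
    rw [hfold, if_neg (fun hm => he ((hmlmem x).1 hm).2)]
  have hrr : ru ≠ rv := hrr
  have hρ'ru : (mlist.foldl (fun c x => c.insert x ru) c).getD ru 0 = ru := by
    rw [hρ'b ru (by rw [hruroot]; exact hrr), hruroot]
  -- characterization of the new representative map on D
  have hnew : ∀ x, D x → ((mlist.foldl (fun c x => c.insert x ru) c).getD x 0 = ru ∧ (c.getD x 0 = ru ∨ c.getD x 0 = rv)) ∨
      ((mlist.foldl (fun c x => c.insert x ru) c).getD x 0 = c.getD x 0 ∧ c.getD x 0 ≠ rv) := by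
    intro x hx
    by_cases he : c.getD x 0 = rv
    · exact Or.inl ⟨hρ'a x hx he, Or.inr he⟩
    · exact Or.inr ⟨hρ'b x he, he⟩
  have hnotrv : ∀ x, D x → (mlist.foldl (fun c x => c.insert x ru) c).getD x 0 ≠ rv := by
    intro x hx
    rcases hnew x hx with ⟨he, _⟩ | ⟨he, hne⟩
    · rw [he]; exact hrr
    · rw [he]; exact hne
  refine ⟨?_, ?_, ?_, ?_, ?_, ?_⟩
  · intro x hx
    rcases endsP_append.1 hx with hx | hx
    · exact h1 x hx
    · rcases endsP_single.1 hx with rfl | rfl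
      · exact hu
      · exact hv
  · intro x
    rw [show (mlist.foldl (fun c x => c.insert x ru) c).contains x = (x ∈ mlist || c.contains x) from
      contains_foldl_insert_const mlist c ru x]
    rw [Bool.or_eq_true_iff]
    constructor
    · rintro (hb | hb)
      · exact ((hmlmem x).1 (by simpa using hb)).1
      · exact (h2 x).1 hb
    · intro hd
      exact Or.inr ((h2 x).2 hd)
  · intro x hx
    rcases hnew x hx with ⟨he, _⟩ | ⟨he, hne⟩
    · rw [he]
      exact ⟨hDru, hρ'ru⟩
    · rw [he]
      obtain ⟨ha, hb⟩ := h3 x hx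
      refine ⟨ha, ?_⟩
      rw [hρ'b _ (by rw [hb]; exact hne), hb]
  · intro x y hx hy
    rw [connE_append_iff]
    have hxu : ConnE E x u ↔ c.getD x 0 = ru := by
      rw [hru]; exact (h4 x u hx hu).symm
    have hyu : ConnE E u y ↔ c.getD y 0 = ru := by
      rw [hru]
      exact ⟨fun hc => (h4 y u hy hu).2 (connE_symm hc), fun he => connE_symm ((h4 y u hy hu).1 he)⟩
    have hxv : ConnE E x v ↔ c.getD x 0 = rv := by
      rw [hrv]; exact (h4 x v hx hv).symm
    have hyv : ConnE E v y ↔ c.getD y 0 = rv := by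
      rw [hrv]
      exact ⟨fun hc => (h4 y v hy hv).2 (connE_symm hc), fun he => connE_symm ((h4 y v hy hv).1 he)⟩
    rw [← h4 x y hx hy, hxu, hyu, hxv, hyv]
    rcases hnew x hx with ⟨hex, hcx⟩ | ⟨hex, hcx⟩ <;> rcases hnew y hy with ⟨hey, hcy⟩ | ⟨hey, hcy⟩ <;>
      rw [hex, hey] <;> omega
  · intro r
    rw [contains_erase, PySem.Dict.contains_modify]
    constructor
    · intro hb
      by_cases hrrv : r = rv
      · rw [if_pos hrrv] at hb; exact absurd hb (by simp)
      · rw [if_neg hrrv, Bool.or_eq_true_iff] at hb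
        have hcm : D r ∧ c.getD r 0 = r := by
          rcases hb with hb | hb
          · have : r = ru := by simpa using hb
            subst this
            exact ⟨hDru, hruroot⟩
          · exact (h5 r).1 hb
        obtain ⟨hd, hroot⟩ := hcm
        refine ⟨hd, ?_⟩
        rw [hρ'b r (by rw [hroot]; exact hrrv), hroot]
    · rintro ⟨hd, hroot⟩
      have hrrv : r ≠ rv := by
        intro he
        exact hnotrv r hd (he ▸ hroot)
      rw [if_neg hrrv, Bool.or_eq_true_iff]
      rcases hnew r hd with ⟨he, _⟩ | ⟨he, hne⟩
      · rw [he] at hroot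
        subst hroot
        exact Or.inl (by simp)
      · rw [he] at hroot
        exact Or.inr ((h5 r).2 ⟨hd, hroot⟩)
  · intro r hd hroot
    have hrrv : r ≠ rv := by
      intro he
      exact hnotrv r hd (he ▸ hroot)
    have hrootold : c.getD r 0 = r := by
      rcases hnew r hd with ⟨he, hc⟩ | ⟨he, _⟩
      · rw [he] at hroot
        subst hroot
        exact hruroot
      · rwa [he] at hroot
    rw [show ((m.modify ru [] (· ++ mlist)).erase rv).getD r [] = (m.modify ru [] (· ++ mlist)).getD r [] from by
      rw [getD_erase]; exact if_neg hrrv]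
    rw [PySem.Dict.getD_modify]
    obtain ⟨hrnd, hrmem⟩ := h6 r hd hrootold
    by_cases hrru : r = ru
    · subst hrru
      rw [if_pos rfl]
      obtain ⟨hrund, hrumem⟩ := h6 r hd hrootold
      refine ⟨?_, ?_⟩
      · refine hrund.append hmlnd (List.disjoint_left.2 ?_)
        intro a ha1 ha2
        have e1 := (hrumem a).1 ha1
        have e2 := (hmlmem a).1 ha2
        exact hrr (e1.2 ▸ e2.2 ▸ rfl)
      · intro x
        rw [List.mem_append, hrumem x, hmlmem x]
        constructor
        · rintro (⟨hdx, hex⟩ | ⟨hdx, hex⟩)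
          · exact ⟨hdx, by rw [hρ'b x (by rw [hex]; exact fun hh => hrrv (hroot ▸ hh)), hex]⟩
          · exact ⟨hdx, hρ'a x hdx hex⟩
        · rintro ⟨hdx, hex⟩
          rcases hnew x hdx with ⟨he, hc⟩ | ⟨he, hne⟩
          · rcases hc with hc | hc
            · exact Or.inl ⟨hdx, hc⟩
            · exact Or.inr ⟨hdx, hc⟩
          · rw [he] at hex
            exact Or.inl ⟨hdx, hex⟩
    · rw [if_neg hrru]
      refine ⟨hrnd, ?_⟩
      intro x
      rw [hrmem x]
      constructor
      · rintro ⟨hdx, hex⟩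
        refine ⟨hdx, ?_⟩
        rw [hρ'b x (by rw [hex]; exact hrrv), hex]
      · rintro ⟨hdx, hex⟩
        rcases hnew x hdx with ⟨he, hc⟩ | ⟨he, hne⟩
        · rw [he] at hex
          exact absurd hex.symm hrru
        · rw [he] at hex
          exact ⟨hdx, hex⟩

theorem BInv_step {E : List (Int × Int)} {D : Int → Prop} {c : PySem.Dict Int Int}
    {m : PySem.Dict Int (List Int)} (h : BInvD E D c m) (u v : Int) :
    BInvD (E ++ [(u, v)]) (fun x => (D x ∨ x = u) ∨ x = v)
      (altEdgeStep (c, m) (u, v)).1 (altEdgeStep (c, m) (u, v)).2 := by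
  simp only [altEdgeStep]
  by_cases hcu : c.contains u = true
  · have h1 : BInvD E (fun x => D x ∨ x = u) c m := BInv_ensure_old h u ((h.2.1 u).1 hcu)
    simp only [hcu, eq_self_iff_true, if_true]
    by_cases hcv : c.contains v = true
    · have h2 : BInvD E (fun x => (D x ∨ x = u) ∨ x = v) c m :=
        BInv_ensure_old h1 v (Or.inl ((h.2.1 v).1 hcv))
      simp only [hcv, eq_self_iff_true, if_true]
      by_cases hr : c.getD u 0 = c.getD v 0
      · simp only [hr, eq_self_iff_true, if_true]
        exact BInv_edge_same h2 (Or.inl (Or.inr rfl)) (Or.inr rfl) hr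
      · simp only [if_neg hr]
        exact BInv_edge_merge h2 (Or.inl (Or.inr rfl)) (Or.inr rfl) rfl rfl hr
    · have h2 : BInvD E (fun x => (D x ∨ x = u) ∨ x = v) (c.insert v v) (m.insert v [v]) :=
        BInv_ensure_new h1 v (fun hd => hcv ((h.2.1 v).2 (hd.elim id (fun he => he ▸ (h.2.1 u).1 hcu))))
      simp only [hcv, Bool.false_eq_true, if_false]
      by_cases hr : (c.insert v v).getD u 0 = (c.insert v v).getD v 0
      · simp only [hr, eq_self_iff_true, if_true]
        exact BInv_edge_same h2 (Or.inl (Or.inr rfl)) (Or.inr rfl) hr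
      · simp only [if_neg hr]
        exact BInv_edge_merge h2 (Or.inl (Or.inr rfl)) (Or.inr rfl) rfl rfl hr
  · have h1 : BInvD E (fun x => D x ∨ x = u) (c.insert u u) (m.insert u [u]) :=
      BInv_ensure_new h u (fun hd => hcu ((h.2.1 u).2 hd))
    simp only [hcu, Bool.false_eq_true, if_false]
    by_cases hcv : (c.insert u u).contains v = true
    · have h2 : BInvD E (fun x => (D x ∨ x = u) ∨ x = v) (c.insert u u) (m.insert u [u]) :=
        BInv_ensure_old h1 v ((h1.2.1 v).1 hcv)
      simp only [hcv, eq_self_iff_true, if_true]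
      by_cases hr : (c.insert u u).getD u 0 = (c.insert u u).getD v 0
      · simp only [hr, eq_self_iff_true, if_true]
        exact BInv_edge_same h2 (Or.inl (Or.inr rfl)) (Or.inr rfl) hr
      · simp only [if_neg hr]
        exact BInv_edge_merge h2 (Or.inl (Or.inr rfl)) (Or.inr rfl) rfl rfl hr
    · have h2 : BInvD E (fun x => (D x ∨ x = u) ∨ x = v)
          ((c.insert u u).insert v v) ((m.insert u [u]).insert v [v]) :=
        BInv_ensure_new h1 v (fun hd => hcv ((h1.2.1 v).2 hd))
      simp only [hcv, Bool.false_eq_true, if_false]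
      by_cases hr : ((c.insert u u).insert v v).getD u 0 = ((c.insert u u).insert v v).getD v 0
      · simp only [hr, eq_self_iff_true, if_true]
        exact BInv_edge_same h2 (Or.inl (Or.inr rfl)) (Or.inr rfl) hr
      · simp only [if_neg hr]
        exact BInv_edge_merge h2 (Or.inl (Or.inr rfl)) (Or.inr rfl) rfl rfl hr

theorem BInv_empty : BInvD [] (endsP []) PySem.Dict.empty PySem.Dict.empty := by
  have hD : ∀ x : Int, ¬ endsP ([] : List (Int × Int)) x := by
    rintro x ⟨p, hp, _⟩
    exact absurd hp (List.not_mem_nil)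
  refine ⟨fun x hx => hx, ?_, ?_, ?_, ?_, ?_⟩
  · intro x
    simp only [PySem.Dict.contains_empty]
    exact ⟨fun hb => absurd hb (by simp), fun hd => absurd hd (hD x)⟩
  · exact fun x hx => absurd hx (hD x)
  · exact fun x y hx => absurd hx (hD x)
  · intro r
    simp only [PySem.Dict.contains_empty]
    exact ⟨fun hb => absurd hb (by simp), fun hd => absurd hd.1 (hD r)⟩
  · exact fun r hr => absurd hr (hD r)

theorem BInv_fold : ∀ (L E : List (Int × Int)) (c : PySem.Dict Int Int) (m : PySem.Dict Int (List Int)),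
    BInvD E (endsP E) c m →
    BInvD (E ++ L) (endsP (E ++ L)) (L.foldl altEdgeStep (c, m)).1 (L.foldl altEdgeStep (c, m)).2 := by
  intro L
  induction L with
  | nil =>
    intro E c m h
    simpa using h
  | cons e L ih =>
    intro E c m h
    rw [List.foldl_cons]
    obtain ⟨u, v⟩ := e
    have hstep := BInv_step h u v
    have hstep' : BInvD (E ++ [(u, v)]) (endsP (E ++ [(u, v)]))
        (altEdgeStep (c, m) (u, v)).1 (altEdgeStep (c, m) (u, v)).2 := by
      refine BInvD_congr (fun x => ?_) hstep
      rw [endsP_append, endsP_single]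
      tauto
    have hres := ih (E ++ [(u, v)]) (altEdgeStep (c, m) (u, v)).1 (altEdgeStep (c, m) (u, v)).2 hstep'
    simpa [List.append_assoc] using hres

-- ===== coupled outer loops: A's BFS pass and B's bucket pass build the same answer list =====
theorem outer_couple (E : List (Int × Int)) (g : PySem.Dict Int (List Int))
    (c : PySem.Dict Int Int) (m : PySem.Dict Int (List Int))
    (Hgc : ∀ x, g.contains x = true ↔ endsP E x)
    (Hgn : ∀ x cc, cc ∈ g.getD x [] ↔ adjE E x cc)
    (hB : BInvD E (endsP E) c m) :
    ∀ (L done ansA : List Int) (visitA : PySem.Set Int) (ansB : List Int) (seenB : PySem.Set Int),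
    ansA = ansB →
    (∀ x, x ∈ visitA ↔ ∃ d ∈ done, endsP E d ∧ ConnE E d x) →
    (∀ r, r ∈ seenB ↔ ∃ d ∈ done, endsP E d ∧ r = c.getD d 0) →
    (L.foldl (aOuterStep g) (ansA, visitA)).1 = (L.foldl (bOuterStep c m) (ansB, seenB)).1 ∧
    (∀ x, x ∈ (L.foldl (aOuterStep g) (ansA, visitA)).2 ↔ ∃ d ∈ done ++ L, endsP E d ∧ ConnE E d x) ∧
    (∀ r, r ∈ (L.foldl (bOuterStep c m) (ansB, seenB)).2 ↔ ∃ d ∈ done ++ L, endsP E d ∧ r = c.getD d 0) := by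
  obtain ⟨hc1, hc2, hc3, hc4, hc5, hc6⟩ := hB
  intro L
  induction L with
  | nil =>
    intro done ansA visitA ansB seenB hans hv hs
    simpa using ⟨hans, hv, hs⟩
  | cons i L ih =>
    intro done ansA visitA ansB seenB hans hv hs
    rw [List.foldl_cons, List.foldl_cons, show done ++ i :: L = (done ++ [i]) ++ L from by simp]
    by_cases hEi : endsP E i
    · have hga : g.contains i = true := (Hgc i).2 hEi
      have hgb : c.contains i = true := (hc2 i).2 hEi
      have hPA : PySem.Set.contains visitA i = true ↔ ∃ d ∈ done, endsP E d ∧ ConnE E d i := by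
        rw [PySem.Set.contains_iff]
        exact hv i
      have hPB : PySem.Set.contains seenB (c.getD i 0) = true ↔
          ∃ d ∈ done, endsP E d ∧ ConnE E d i := by
        rw [PySem.Set.contains_iff, hs (c.getD i 0)]
        constructor
        · rintro ⟨d, hd, hde, heq⟩
          exact ⟨d, hd, hde, connE_symm ((hc4 i d hEi hde).1 heq)⟩
        · rintro ⟨d, hd, hde, hco⟩
          exact ⟨d, hd, hde, (hc4 i d hEi hde).2 (connE_symm hco)⟩
      by_cases hseen : ∃ d ∈ done, endsP E d ∧ ConnE E d i
      · -- this component was already reported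
        obtain ⟨d0, hd0, hd0e, hd0c⟩ := hseen
        have hmA : i ∈ visitA := (hv i).2 ⟨d0, hd0, hd0e, hd0c⟩
        have hmB : c.getD i 0 ∈ seenB :=
          (hs (c.getD i 0)).2 ⟨d0, hd0, hd0e, (hc4 i d0 hEi hd0e).2 (connE_symm hd0c)⟩
        have hstepA : aOuterStep g (ansA, visitA) i = (ansA, visitA) := by
          simp [aOuterStep, hga, hmA]
        have hstepB : bOuterStep c m (ansB, seenB) i = (ansB, seenB) := by
          simp [bOuterStep, hgb, hmB]
        rw [hstepA, hstepB]
        refine ih (done ++ [i]) _ _ _ _ hans ?_ ?_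
        · intro x
          rw [hv x]
          constructor
          · rintro ⟨d, hd, h⟩
            exact ⟨d, List.mem_append.2 (Or.inl hd), h⟩
          · rintro ⟨d, hd, hde, hcx⟩
            rcases List.mem_append.1 hd with hd | hd
            · exact ⟨d, hd, hde, hcx⟩
            · simp at hd
              exact ⟨d0, hd0, hd0e, hd0c.trans (hd ▸ hcx)⟩
        · intro r
          rw [hs r]
          constructor
          · rintro ⟨d, hd, h⟩
            exact ⟨d, List.mem_append.2 (Or.inl hd), h⟩
          · rintro ⟨d, hd, hde, he⟩
            rcases List.mem_append.1 hd with hd | hd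
            · exact ⟨d, hd, hde, he⟩
            · simp at hd
              exact ⟨d0, hd0, hd0e, by rw [he, hd]; exact (hc4 i d0 hEi hd0e).2 (connE_symm hd0c)⟩
      · -- a fresh component: A runs bfs, B reads the bucket of comp[i]
        have hiv : i ∉ visitA := fun hmem => hseen ((hv i).1 hmem)
        have hvadd : PySem.Set.add visitA i = visitA ++ [i] := PySem.Set.add_of_not_mem hiv
        have hdis : ∀ x, ConnE E i x → ¬ (∃ d ∈ done, endsP E d ∧ ConnE E d x) := by
          rintro x hcx ⟨d, hd, hde, hdx⟩
          exact hseen ⟨d, hd, hde, hdx.trans (connE_symm hcx)⟩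
        have hbfs := bfs_spec g E (fun x => ∃ d ∈ done, endsP E d ∧ ConnE E d x) i Hgn hdis
          [i] (PySem.Set.add visitA i) [i]
          (by simp)
          (by
            intro x
            rw [hvadd]
            simp only [List.mem_append, List.mem_singleton]
            rw [hv x])
          (List.nodup_singleton i)
          (by
            intro x hx
            simp at hx; subst hx
            exact connE_refl _)
          (by
            intro x hx hxq
            simp at hx
            exact absurd (List.mem_singleton.2 hx) hxq)
          (by simp)
        obtain ⟨hnd2, hmem2, hvis2⟩ := hbfs
        have hDr0 : endsP E (c.getD i 0) := (hc3 i hEi).1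
        have hroot0 : c.getD (c.getD i 0) 0 = c.getD i 0 := (hc3 i hEi).2
        obtain ⟨hmnd, hmmem⟩ := hc6 (c.getD i 0) hDr0 hroot0
        have hmemiff : ∀ x, x ∈ (bfsLoop g [i] (PySem.Set.add visitA i) [i]).2 ↔
            x ∈ m.getD (c.getD i 0) [] := by
          intro x
          rw [hmem2 x, hmmem x]
          constructor
          · intro hcx
            have hex : endsP E x := by
              rcases connE_ends hcx with rfl | ⟨_, h⟩
              · exact hEi
              · exact h
            exact ⟨hex, (hc4 x i hex hEi).2 (connE_symm hcx)⟩
          · rintro ⟨hex, heq⟩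
            exact connE_symm ((hc4 x i hex hEi).1 heq)
        have hsorted : PySem.List.sorted (bfsLoop g [i] (PySem.Set.add visitA i) [i]).2 (fun x => x) =
            PySem.List.sorted (m.getD (c.getD i 0) []) (fun x => x) :=
          PySem.List.sorted_eq_sorted_of_perm _ _ _ (fun _ _ hab => hab)
            ((List.perm_ext_iff_of_nodup hnd2 hmnd).2 hmemiff)
        have hnseenmem : c.getD i 0 ∉ seenB := by
          intro hm
          obtain ⟨d, hd, hde, heq⟩ := (hs _).1 hm
          exact hseen ⟨d, hd, hde, connE_symm ((hc4 i d hEi hde).1 heq)⟩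
        have hstepA : aOuterStep g (ansA, visitA) i =
            (ansA ++ [PySem.List.pyGetD
                (PySem.List.sorted (bfsLoop g [i] (PySem.Set.add visitA i) [i]).2 (fun x => x))
                (PySem.Int.floordiv
                  (((PySem.List.sorted (bfsLoop g [i] (PySem.Set.add visitA i) [i]).2 (fun x => x)).length : Int) - 1) 2) 0],
              (bfsLoop g [i] (PySem.Set.add visitA i) [i]).1) := by
          simp [aOuterStep, hga, hiv]
        have hstepB : bOuterStep c m (ansB, seenB) i =
            (ansB ++ [PySem.List.pyGetD
                (PySem.List.sorted (m.getD (c.getD i 0) []) (fun x => x))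
                (PySem.Int.floordiv
                  (((PySem.List.sorted (m.getD (c.getD i 0) []) (fun x => x)).length : Int) - 1) 2) 0],
              PySem.Set.add seenB (c.getD i 0)) := by
          simp [bOuterStep, hgb, hnseenmem]
        rw [hstepA, hstepB, hsorted]
        refine ih (done ++ [i]) _ _ _ _ (by rw [hans]) ?_ ?_
        · intro x
          rw [hvis2 x]
          constructor
          · rintro (⟨d, hd, h⟩ | hcx)
            · exact ⟨d, List.mem_append.2 (Or.inl hd), h⟩
            · exact ⟨i, List.mem_append.2 (Or.inr (by simp)), hEi, hcx⟩
          · rintro ⟨d, hd, hde, hcx⟩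
            rcases List.mem_append.1 hd with hd | hd
            · exact Or.inl ⟨d, hd, hde, hcx⟩
            · simp at hd
              exact Or.inr (hd ▸ hcx)
        · intro r
          rw [PySem.Set.mem_add, hs r]
          constructor
          · rintro (⟨d, hd, h⟩ | rfl)
            · exact ⟨d, List.mem_append.2 (Or.inl hd), h⟩
            · exact ⟨i, List.mem_append.2 (Or.inr (by simp)), hEi, rfl⟩
          · rintro ⟨d, hd, hde, he⟩
            rcases List.mem_append.1 hd with hd | hd
            · exact Or.inl ⟨d, hd, hde, he⟩
            · simp at hd
              exact Or.inr (hd ▸ he)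
    · have hga : g.contains i = false := by
        rcases hb : g.contains i with _ | _
        · rfl
        · exact absurd ((Hgc i).1 hb) hEi
      have hgb : c.contains i = false := by
        rcases hb : c.contains i with _ | _
        · rfl
        · exact absurd ((hc2 i).1 hb) hEi
      have hstepA : aOuterStep g (ansA, visitA) i = (ansA ++ [i], visitA) := by
        simp [aOuterStep, hga]
      have hstepB : bOuterStep c m (ansB, seenB) i = (ansB ++ [i], seenB) := by
        simp [bOuterStep, hgb]
      rw [hstepA, hstepB]
      have hiff : ∀ (Q : Int → Prop), (∃ d ∈ done, endsP E d ∧ Q d) ↔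
          (∃ d ∈ done ++ [i], endsP E d ∧ Q d) := by
        intro Q
        constructor
        · rintro ⟨d, hd, h⟩
          exact ⟨d, List.mem_append.2 (Or.inl hd), h⟩
        · rintro ⟨d, hd, h⟩
          rcases List.mem_append.1 hd with hd | hd
          · exact ⟨d, hd, h⟩
          · simp at hd
            exact absurd (hd ▸ h.1) hEi
      refine ih (done ++ [i]) _ _ _ _ (by rw [hans]) ?_ ?_
      · intro x
        exact (hv x).trans (hiff (fun d => ConnE E d x))
      · intro r
        exact (hs r).trans (hiff (fun d => r = c.getD d 0))

-- ===== assembly =====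
theorem solution_eq (n : Int) (t1 t2 : List Int) (hpre : t1.length ≤ t2.length) :
    solution n t1 t2 = solution_alt n t1 t2 := by
  have hbuild : buildGraph t1 t2 = (t1.zip t2).foldl gStep PySem.Dict.empty := by
    unfold buildGraph gStep
    exact foldl_range_getD_zip t1 t2 hpre
      (fun g a b => (g.modify a [] (· ++ [b])).modify b [] (· ++ [a])) PySem.Dict.empty
  have Hgc : ∀ x, (buildGraph t1 t2).contains x = true ↔ endsP (t1.zip t2) x := by
    intro x
    rw [hbuild, contains_gfold]
    simp [PySem.Dict.contains_empty]
  have Hgn : ∀ x cc, cc ∈ (buildGraph t1 t2).getD x [] ↔ adjE (t1.zip t2) x cc := by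
    intro x cc
    rw [hbuild, getD_gfold]
    simp [PySem.Dict.getD_empty]
  have hB : BInvD (t1.zip t2) (endsP (t1.zip t2))
      ((t1.zip t2).foldl altEdgeStep (PySem.Dict.empty, PySem.Dict.empty)).1
      ((t1.zip t2).foldl altEdgeStep (PySem.Dict.empty, PySem.Dict.empty)).2 := by
    have := BInv_fold (t1.zip t2) [] PySem.Dict.empty PySem.Dict.empty BInv_empty
    simpa using this
  have hco := outer_couple (t1.zip t2) (buildGraph t1 t2) _ _ Hgc Hgn hB
    (PySem.List.pyRange 1 (n + 1)) [] [] PySem.Set.empty [] PySem.Set.empty rfl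
    (by intro x; simp [PySem.Set.empty])
    (by intro r; simp [PySem.Set.empty])
  show PySem.List.sorted
      ((PySem.List.pyRange 1 (n + 1)).foldl (aOuterStep (buildGraph t1 t2)) ([], PySem.Set.empty)).1 (fun x => x)
    = PySem.List.sorted
      ((PySem.List.pyRange 1 (n + 1)).foldl
        (bOuterStep ((t1.zip t2).foldl altEdgeStep (PySem.Dict.empty, PySem.Dict.empty)).1
          ((t1.zip t2).foldl altEdgeStep (PySem.Dict.empty, PySem.Dict.empty)).2) ([], PySem.Set.empty)).1 (fun x => x)
  rw [hco.1]

-- ===== VERDICT (by name: the statement is the Claim_ definition above) =====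
theorem solution_spec : Claim_equal_solution := by
  intro n t1 t2 _ hpre
  unfold Spec_solution
  unfold Pre_solution at hpre
  exact solution_eq n t1 t2 hpre
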